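-- pv_equiv track=rewrite | github.com/manpreet1994/topgear_python_level1 | q1.py | q1
-- ===== SOURCE A (Python) =====
-- def q1(inputlist):
-- 	tempDomainList = ["edu","com","org","in"]
-- 	tempUrlList = inputlist
-- 	sortedUrlList = []
--
-- 	for i,v in enumerate(tempDomainList):
-- 		for i1,v1 in enumerate(tempUrlList):
-- 			if v1.endswith(v):
-- 				sortedUrlList.append(v1)
--
-- 	return sortedUrlList
-- ===== SOURCE B (Python) =====
-- def q1(inputlist):
--     buckets = {"edu": [], "com": [], "org": [], "in": []}
--     for url in inputlist:
--         for suffix in buckets: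
--             if url.endswith(suffix):
--                 buckets[suffix].append(url)
--                 break
--     return buckets["edu"] + buckets["com"] + buckets["org"] + buckets["in"]
-- ===== Notes on version B (the rewrite author's own statement) =====
-- stated objective: alternative
-- what changed: B makes a single pass over the URLs, bucketing each into a dict keyed by its matching suffix (with an early break; buckets are disjoint since the suffixes end in distinct characters), then concatenates the buckets in priority order, instead of A's four full rescans of the list.
import Mathlib
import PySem

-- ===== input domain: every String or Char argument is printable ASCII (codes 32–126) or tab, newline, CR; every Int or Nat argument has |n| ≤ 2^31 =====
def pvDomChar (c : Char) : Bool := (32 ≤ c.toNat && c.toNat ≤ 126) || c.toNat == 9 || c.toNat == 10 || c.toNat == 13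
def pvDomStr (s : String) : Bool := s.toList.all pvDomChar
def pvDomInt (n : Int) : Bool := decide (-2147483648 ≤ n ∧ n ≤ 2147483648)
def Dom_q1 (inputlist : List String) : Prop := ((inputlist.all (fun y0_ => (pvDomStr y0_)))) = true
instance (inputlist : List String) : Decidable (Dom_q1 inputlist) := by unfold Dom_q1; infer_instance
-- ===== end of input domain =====

-- B buckets URLs by matching suffix in one pass, then concatenates buckets in priority order (one scan instead of four).

-- ===== PORT A =====
def q1 (inputlist : List String) : List String :=
  let tempDomainList : List String := ["edu", "com", "org", "in"]
  let tempUrlList := inputlist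
  let sortedUrlList : List String := []
  tempDomainList.foldl (fun acc v =>
    tempUrlList.foldl (fun acc2 v1 =>
      if PySem.Str.endswith v1 v then acc2 ++ [v1] else acc2) acc) sortedUrlList

-- ===== PORT B =====
-- one step of B's loop: put url into the first bucket whose suffix matches (break), else drop it
def q1AltStep (b : List String × List String × List String × List String) (url : String) :
    List String × List String × List String × List String :=
  if PySem.Str.endswith url "edu" then (b.1 ++ [url], b.2.1, b.2.2.1, b.2.2.2)
  else if PySem.Str.endswith url "com" then (b.1, b.2.1 ++ [url], b.2.2.1, b.2.2.2)
  else if PySem.Str.endswith url "org" then (b.1, b.2.1, b.2.2.1 ++ [url], b.2.2.2)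
  else if PySem.Str.endswith url "in" then (b.1, b.2.1, b.2.2.1, b.2.2.2 ++ [url])
  else b

def q1_alt (inputlist : List String) : List String :=
  let b := inputlist.foldl q1AltStep ([], [], [], [])
  b.1 ++ b.2.1 ++ b.2.2.1 ++ b.2.2.2

-- ===== PRECONDITION & SPEC =====
def Spec_q1 (inputlist : List String) (out : List String) : Prop := out = q1_alt inputlist
instance (inputlist : List String) (out : List String) : Decidable (Spec_q1 inputlist out) := by unfold Spec_q1; infer_instance

-- ===== CLAIM (what is proved, stated in full; the proofs are below) =====
def Claim_equal_q1 : Prop := ∀ (inputlist : List String), Dom_q1 inputlist → Spec_q1 inputlist (q1 inputlist)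

-- ===== LEMMAS AND PROOFS =====

-- two suffixes whose last characters differ cannot both match
theorem pv_excl (u p q : List Char) (hne : p.getLast? ≠ q.getLast?)
    (hp : p ≠ []) (hq : q ≠ [])
    (h1 : PySem.Chars.endswith u p = true) (h2 : PySem.Chars.endswith u q = true) : False := by
  rw [PySem.Chars.endswith_iff] at h1 h2
  obtain ⟨a, ha⟩ := h1
  obtain ⟨b, hb⟩ := h2
  apply hne
  have h := congrArg List.getLast? (ha.trans hb.symm)
  rwa [List.getLast?_append_of_ne_nil _ hp, List.getLast?_append_of_ne_nil _ hq] at h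

-- loop invariant for B: each bucket accumulates the filter of its suffix
theorem pv_inv (l : List String) (e c o i : List String) :
    l.foldl q1AltStep (e, c, o, i) =
      (e ++ l.filter (fun u => PySem.Str.endswith u "edu"),
       c ++ l.filter (fun u => PySem.Str.endswith u "com"),
       o ++ l.filter (fun u => PySem.Str.endswith u "org"),
       i ++ l.filter (fun u => PySem.Str.endswith u "in")) := by
  induction l generalizing e c o i with
  | nil => simp
  | cons u t ih =>
    simp only [List.foldl_cons, List.filter_cons, q1AltStep, PySem.Str.endswith_eq]
    by_cases he : PySem.Chars.endswith u.toList ['e', 'd', 'u'] = true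
    · have hc : ¬ PySem.Chars.endswith u.toList ['c', 'o', 'm'] = true :=
        fun h => pv_excl u.toList _ _ (by decide) (by decide) (by decide) h he
      have ho : ¬ PySem.Chars.endswith u.toList ['o', 'r', 'g'] = true :=
        fun h => pv_excl u.toList _ _ (by decide) (by decide) (by decide) h he
      have hi : ¬ PySem.Chars.endswith u.toList ['i', 'n'] = true :=
        fun h => pv_excl u.toList _ _ (by decide) (by decide) (by decide) h he
      simp [he, hc, ho, hi, ih]
    · by_cases hc : PySem.Chars.endswith u.toList ['c', 'o', 'm'] = true
      · have ho : ¬ PySem.Chars.endswith u.toList ['o', 'r', 'g'] = true :=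
          fun h => pv_excl u.toList _ _ (by decide) (by decide) (by decide) h hc
        have hi : ¬ PySem.Chars.endswith u.toList ['i', 'n'] = true :=
          fun h => pv_excl u.toList _ _ (by decide) (by decide) (by decide) h hc
        simp [he, hc, ho, hi, ih]
      · by_cases ho : PySem.Chars.endswith u.toList ['o', 'r', 'g'] = true
        · have hi : ¬ PySem.Chars.endswith u.toList ['i', 'n'] = true :=
            fun h => pv_excl u.toList _ _ (by decide) (by decide) (by decide) h ho
          simp [he, hc, ho, hi, ih]
        · by_cases hi : PySem.Chars.endswith u.toList ['i', 'n'] = true <;>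
            simp [he, hc, ho, hi, ih]

-- ===== VERDICT (by name: the statement is the Claim_ definition above) =====
theorem q1_spec : Claim_equal_q1 := by
  intro inputlist _
  unfold Spec_q1 q1 q1_alt
  simp only [List.foldl_cons, List.foldl_nil, PySem.List.foldl_append_if_eq_filter, pv_inv,
    List.nil_append, List.append_assoc]
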